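-- pv_equiv track=rewrite | github.com/sandman9988/VelocityTrader | Tools/archive/original_tools/fix_mql5_compilation.py | add_missing_includes
-- ===== SOURCE A (Python) =====
-- def add_missing_includes(content, filename):
--     """Add missing standard includes"""
--     includes_needed = []
--
--     # Check what's used
--     if 'DBL_EPSILON' in content and '#include <Math' not in content:
--         includes_needed.append('#include <Math/MathConstants.mqh>')
--
--     if includes_needed:
--         # Find where to insert (after #property strict)
--         lines = content.split('\n')
--         insert_index = 0
--
--         for i, line in enumerate(lines):
--             if '#property strict' in line:
--                 insert_index = i + 1
--                 break
--
--         # Insert the includes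
--         for include in includes_needed:
--             lines.insert(insert_index, include)
--             insert_index += 1
--
--         content = '\n'.join(lines)
--
--     return content
-- ===== SOURCE B (Python) =====
-- def add_missing_includes(content, filename):
--     """Add missing standard includes"""
--     include = '#include <Math/MathConstants.mqh>'
--     if 'DBL_EPSILON' not in content or '#include <Math' in content:
--         return content
--     pos = content.find('#property strict')
--     if pos == -1:
--         return include + '\n' + content
--     nl = content.find('\n', pos)
--     if nl == -1:
--         return content + '\n' + include
--     return content[:nl + 1] + include + '\n' + content[nl + 1:]
-- ===== Notes on version B (the rewrite author's own statement) =====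
-- stated objective: simpler
-- what changed: Replaces split-into-lines + enumerate scan + list insert + join with direct string index math (find the needle, find the end of its line, splice with two slices), never building the line list.
import Mathlib
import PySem

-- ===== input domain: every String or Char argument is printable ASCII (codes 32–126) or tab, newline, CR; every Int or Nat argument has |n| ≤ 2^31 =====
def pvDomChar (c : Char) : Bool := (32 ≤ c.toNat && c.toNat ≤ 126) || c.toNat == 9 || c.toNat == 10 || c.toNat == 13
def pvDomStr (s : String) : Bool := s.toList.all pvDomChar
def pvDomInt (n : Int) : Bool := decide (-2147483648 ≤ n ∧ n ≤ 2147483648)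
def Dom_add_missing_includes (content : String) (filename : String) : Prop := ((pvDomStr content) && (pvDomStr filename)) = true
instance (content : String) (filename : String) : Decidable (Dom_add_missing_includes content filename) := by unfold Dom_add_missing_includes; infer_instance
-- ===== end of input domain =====

-- B replaces A's split-into-lines / enumerate scan / list-insert / join pipeline by direct
-- string index math (find the needle, find the end of its line, splice with slices); same value.

-- ===== PORT A =====
-- helper for A's 'for i, line in enumerate(lines): if '#property strict' in line: insert_index = i + 1; break'
def pvScanA (lines : List (List Char)) (i : Nat) : Nat :=
  match lines with
  | [] => 0
  | l :: rest => if PySem.Chars.isIn "#property strict".toList l then i + 1 else pvScanA rest (i + 1)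

def add_missing_includes (content : String) (filename : String) : String :=
  let cs := content.toList
  let includes_needed : List (List Char) := []
  let includes_needed :=
    if PySem.Chars.isIn "DBL_EPSILON".toList cs && !PySem.Chars.isIn "#include <Math".toList cs then
      includes_needed ++ ["#include <Math/MathConstants.mqh>".toList]
    else includes_needed
  if includes_needed.isEmpty then content
  else
    let lines := PySem.Chars.splitOn cs "\n".toList
    let insert_index := pvScanA lines 0
    let st := includes_needed.foldl
      (fun (st : List (List Char) × Nat) inc => (PySem.List.insert st.1 (st.2 : Int) inc, st.2 + 1))
      (lines, insert_index)
    String.ofList (PySem.Chars.join "\n".toList st.1)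

-- ===== PORT B =====
def add_missing_includes_alt (content : String) (filename : String) : String :=
  let cs := content.toList
  let inc := "#include <Math/MathConstants.mqh>".toList
  if !PySem.Chars.isIn "DBL_EPSILON".toList cs || PySem.Chars.isIn "#include <Math".toList cs then
    content
  else
    let pos := PySem.Chars.find cs "#property strict".toList
    if pos = -1 then String.ofList (inc ++ '\n' :: cs)
    else
      let nl := PySem.Chars.findFrom cs "\n".toList pos
      if nl = -1 then String.ofList (cs ++ '\n' :: inc)
      else
        String.ofList (PySem.Chars.slice cs none (some (nl + 1)) ++ inc ++ '\n' ::
          PySem.Chars.slice cs (some (nl + 1)) none)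

-- ===== PRECONDITION & SPEC =====
def Spec_add_missing_includes (content : String) (filename : String) (out : String) : Prop := out = add_missing_includes_alt content filename
instance (content : String) (filename : String) (out : String) : Decidable (Spec_add_missing_includes content filename out) := by unfold Spec_add_missing_includes; infer_instance

-- ===== CLAIM (what is proved, stated in full; the proofs are below) =====
def Claim_equal_add_missing_includes : Prop := ∀ (content : String) (filename : String), Dom_add_missing_includes content filename → Spec_add_missing_includes content filename (add_missing_includes content filename)

-- ===== LEMMAS AND PROOFS =====

def pvNL : List Char := ['\n']
def pvSplit : List Char → List (List Char)
  | [] => [[]]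
  | c :: rest =>
    if c = '\n' then [] :: pvSplit rest
    else
      match pvSplit rest with
      | [] => [[c]]
      | x :: xs => (c :: x) :: xs

theorem pvSplit_ne_nil (cs : List Char) : pvSplit cs ≠ [] := by
  induction cs with
  | nil => simp [pvSplit]
  | cons c rest ih =>
    simp only [pvSplit]
    split
    · simp
    · split
      · simp
      · simp

theorem pvSplit_no_nl {cs : List Char} (h : '\n' ∉ cs) : pvSplit cs = [cs] := by
  induction cs with
  | nil => rfl
  | cons c rest ih =>
    simp only [List.mem_cons, not_or] at h
    rw [pvSplit, if_neg (fun hc : c = '\n' => h.1 hc.symm), ih h.2]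

theorem pvSplit_break {l : List Char} (rest : List Char) (h : '\n' ∉ l) :
    pvSplit (l ++ '\n' :: rest) = l :: pvSplit rest := by
  induction l with
  | nil => simp [pvSplit]
  | cons c t ih =>
    simp only [List.mem_cons, not_or] at h
    rw [List.cons_append, pvSplit, if_neg (fun hc : c = '\n' => h.1 hc.symm), ih h.2]

theorem pv_join (cs : List Char) : PySem.Chars.join pvNL (pvSplit cs) = cs := by
  induction cs with
  | nil => simp [pvSplit, PySem.Chars.join_singleton]
  | cons c rest ih =>
    rw [pvSplit]
    by_cases hc : c = '\n'
    · rw [if_pos hc]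
      cases hs : pvSplit rest with
      | nil => exact absurd hs (pvSplit_ne_nil rest)
      | cons x xs =>
        subst hc
        rw [PySem.Chars.join_cons_cons]
        rw [hs] at ih
        rw [ih]
        simp [pvNL]
    · rw [if_neg hc]
      cases hs : pvSplit rest with
      | nil => exact absurd hs (pvSplit_ne_nil rest)
      | cons x xs =>
        rw [hs] at ih
        cases xs with
        | nil =>
          rw [PySem.Chars.join_singleton] at ih
          rw [PySem.Chars.join_singleton, ih]
        | cons y ys =>
          rw [PySem.Chars.join_cons_cons] at ih
          rw [PySem.Chars.join_cons_cons, ← ih]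
          simp

theorem pv_decomp {cs : List Char} (h : '\n' ∈ cs) :
    ∃ l rest, cs = l ++ '\n' :: rest ∧ '\n' ∉ l := by
  induction cs with
  | nil => simp at h
  | cons c t ih =>
    by_cases hc : c = '\n'
    · exact ⟨[], t, by simp [hc], by simp⟩
    · have ht : '\n' ∈ t := by
        rcases List.mem_cons.mp h with h1 | h1
        · exact absurd h1.symm hc
        · exact h1
      obtain ⟨l, rest, hdec, hnl⟩ := ih ht
      refine ⟨c :: l, rest, by simp [hdec], ?_⟩
      simp only [List.mem_cons, not_or]
      exact ⟨fun hx => hc hx.symm, hnl⟩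

def pvConsHead (p : List Char) : List (List Char) → List (List Char)
  | [] => [p]
  | x :: xs => (p ++ x) :: xs

theorem pv_go (fuel : Nat) (l cur : List Char) (acc : List (List Char)) (h : l.length < fuel) :
    PySem.Chars.splitOn.go pvNL fuel l cur acc = acc.reverse ++ pvConsHead cur.reverse (pvSplit l) := by
  induction fuel generalizing l cur acc with
  | zero => omega
  | succ fuel ih =>
    cases l with
    | nil =>
      rw [PySem.Chars.splitOn.go]
      simp [pvSplit, pvConsHead]
      omega
    | cons c rest =>
      rw [PySem.Chars.splitOn.go]
      by_cases hc : c = '\n'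
      · subst hc
        have hpre : pvNL.isPrefixOf ('\n' :: rest) = true := by simp [pvNL, List.isPrefixOf]
        rw [if_pos hpre]
        rw [ih _ _ _ (by simp [pvNL] at h ⊢; omega)]
        cases hs : pvSplit rest with
        | nil => exact absurd hs (pvSplit_ne_nil rest)
        | cons x xs =>
          simp [pvSplit, pvConsHead, pvNL, hs]
      · have hpre : pvNL.isPrefixOf (c :: rest) = false := by
          simp [pvNL, List.isPrefixOf]
          exact fun hx => hc hx.symm
        rw [if_neg (by simp [hpre])]
        rw [ih _ _ _ (by simp at h ⊢; omega)]
        rw [pvSplit, if_neg hc]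
        cases hs : pvSplit rest with
        | nil => exact absurd hs (pvSplit_ne_nil rest)
        | cons x xs => simp [pvConsHead]

theorem pv_splitOn (cs : List Char) : PySem.Chars.splitOn cs pvNL = pvSplit cs := by
  rw [PySem.Chars.splitOn, pv_go cs.length.succ cs [] [] (by omega)]
  cases hs : pvSplit cs with
  | nil => exact absurd hs (pvSplit_ne_nil cs)
  | cons x xs => simp [pvConsHead]

def pvNeedle : List Char := "#property strict".toList

theorem pvScanA_shift : ∀ (L : List (List Char)) (i : Nat),
    pvScanA L i = if L.any (fun l => PySem.Chars.isIn "#property strict".toList l) then i + pvScanA L 0 else 0 := by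
  intro L
  induction L with
  | nil => intro i; simp [pvScanA]
  | cons l rest ih =>
    intro i
    by_cases hl : PySem.Chars.isIn "#property strict".toList l = true
    · simp only [pvScanA, List.any_cons, hl, Bool.true_or, if_true]
    · simp only [Bool.not_eq_true] at hl
      simp only [pvScanA, List.any_cons, hl, Bool.false_or]
      simp only [Bool.false_eq_true, if_false]
      rw [ih (i + 1), ih (0 + 1)]
      by_cases hr : (rest.any fun l => PySem.Chars.isIn "#property strict".toList l) = true
      · rw [if_pos hr, if_pos hr, if_pos hr]
        omega
      · rw [if_neg hr, if_neg hr]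

theorem pvScanA_le (L : List (List Char)) : pvScanA L 0 ≤ L.length := by
  induction L with
  | nil => simp [pvScanA]
  | cons l rest ih =>
    simp only [pvScanA, List.length_cons]
    split
    · omega
    · rw [pvScanA_shift rest (0 + 1)]
      split <;> omega

theorem pv_needle_no_nl : '\n' ∉ pvNeedle := by decide

theorem pv_prefix_no_nl {u w : List Char}
    (h : pvNeedle <+: u ++ '\n' :: w) : pvNeedle.length ≤ u.length ∧ pvNeedle <+: u := by
  by_cases hlen : pvNeedle.length ≤ u.length
  · have ht := List.prefix_iff_eq_take.mp h
    rw [List.take_append, Nat.sub_eq_zero_of_le hlen, List.take_zero,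
      List.append_nil] at ht
    exact ⟨hlen, ht ▸ List.take_prefix _ _⟩
  · exfalso
    have ht := List.prefix_iff_eq_take.mp h
    rw [List.take_append] at ht
    have hmem : '\n' ∈ pvNeedle := by
      rw [ht]
      refine List.mem_append.mpr (Or.inr ?_)
      have he : pvNeedle.length - u.length = (pvNeedle.length - u.length - 1) + 1 := by omega
      rw [he]
      simp
    exact pv_needle_no_nl hmem

theorem pv_cross {l rest : List Char} {i : Nat}
    (h : pvNeedle <+: (l ++ '\n' :: rest).drop i) :
    (i + pvNeedle.length ≤ l.length ∧ pvNeedle <+: l.drop i) ∨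
      (l.length + 1 ≤ i ∧ pvNeedle <+: rest.drop (i - (l.length + 1))) := by
  rcases Nat.lt_or_ge i (l.length + 1) with hi | hi
  · left
    have hdrop : (l ++ '\n' :: rest).drop i = l.drop i ++ '\n' :: rest := by
      rw [List.drop_append, Nat.sub_eq_zero_of_le (by omega), List.drop_zero]
    rw [hdrop] at h
    obtain ⟨hlen, hpre⟩ := pv_prefix_no_nl h
    have hld : (l.drop i).length = l.length - i := List.length_drop
    exact ⟨by omega, hpre⟩
  · right
    refine ⟨hi, ?_⟩
    rw [List.drop_append, List.drop_eq_nil_of_le (by omega), List.nil_append] at h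
    have he : i - l.length = (i - (l.length + 1)) + 1 := by omega
    rw [he, List.drop_succ_cons] at h
    exact h

theorem pv_isIn_append {l rest : List Char} :
    PySem.Chars.isIn pvNeedle (l ++ '\n' :: rest) =
      (PySem.Chars.isIn pvNeedle l || PySem.Chars.isIn pvNeedle rest) := by
  rw [Bool.eq_iff_iff]
  simp only [Bool.or_eq_true]
  constructor
  · intro h
    obtain ⟨j, hj⟩ := (PySem.Chars.exists_prefix_drop_iff_isIn _ _).mpr h
    rcases pv_cross hj with ⟨_, hpre⟩ | ⟨_, hpre⟩
    · exact Or.inl ((PySem.Chars.exists_prefix_drop_iff_isIn _ _).mp ⟨_, hpre⟩)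
    · exact Or.inr ((PySem.Chars.exists_prefix_drop_iff_isIn _ _).mp ⟨_, hpre⟩)
  · intro h
    apply (PySem.Chars.exists_prefix_drop_iff_isIn _ _).mp
    rcases h with h | h
    · obtain ⟨j, hj⟩ := (PySem.Chars.exists_prefix_drop_iff_isIn _ _).mpr h
      refine ⟨j, ?_⟩
      rw [List.drop_append]
      exact hj.trans (List.prefix_append _ _)
    · obtain ⟨j, hj⟩ := (PySem.Chars.exists_prefix_drop_iff_isIn _ _).mpr h
      refine ⟨l.length + 1 + j, ?_⟩
      rw [List.drop_append, List.drop_eq_nil_of_le (by omega), List.nil_append]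
      have he : l.length + 1 + j - l.length = j + 1 := by omega
      rw [he, List.drop_succ_cons]
      exact hj

theorem pv_any_aux : ∀ (n : Nat) (cs : List Char), cs.length ≤ n →
    (pvSplit cs).any (fun l => PySem.Chars.isIn pvNeedle l) = PySem.Chars.isIn pvNeedle cs := by
  intro n
  induction n with
  | zero =>
    intro cs hn
    have : cs = [] := List.eq_nil_of_length_eq_zero (by omega)
    subst this
    simp [pvSplit]
  | succ n ih =>
    intro cs hn
    by_cases hmem : '\n' ∈ cs
    · obtain ⟨l, rest, hdec, hnl⟩ := pv_decomp hmem
      subst hdec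
      rw [pvSplit_break rest hnl, List.any_cons, ih rest (by simp at hn; omega),
        pv_isIn_append]
    · rw [pvSplit_no_nl hmem, List.any_cons, List.any_nil, Bool.or_false]

theorem pv_any (cs : List Char) :
    (pvSplit cs).any (fun l => PySem.Chars.isIn pvNeedle l) = PySem.Chars.isIn pvNeedle cs :=
  pv_any_aux cs.length cs le_rfl

theorem pv_find_intro {s sub : List Char} {p : Nat} (h1 : sub <+: s.drop p)
    (h2 : ∀ i < p, ¬ sub <+: s.drop i) : PySem.Chars.find s sub = (p : Int) := by
  have hin : PySem.Chars.isIn sub s = true :=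
    (PySem.Chars.exists_prefix_drop_iff_isIn _ _).mp ⟨p, h1⟩
  have h0 : 0 ≤ PySem.Chars.find s sub :=
    (PySem.Chars.find_nonneg_iff _ _).mpr ((PySem.Chars.isIn_iff_infix _ _).mp hin)
  obtain ⟨hpre, hmin⟩ := PySem.Chars.find_spec h0
  have heq : (PySem.Chars.find s sub).toNat = p := by
    rcases Nat.lt_trichotomy (PySem.Chars.find s sub).toNat p with hlt | he | hgt
    · exact absurd hpre (h2 _ hlt)
    · exact he
    · exact absurd h1 (hmin p hgt)
  rw [← Int.toNat_of_nonneg h0, heq]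

theorem pv_findFrom_intro {s sub : List Char} {k q : Nat} (hk : k ≤ s.length) (hkq : k ≤ q)
    (h1 : sub <+: s.drop q) (h2 : ∀ i, k ≤ i → i < q → ¬ sub <+: s.drop i) :
    PySem.Chars.findFrom s sub (k : Int) = (q : Int) := by
  have hne : PySem.Chars.findFrom s sub (k : Int) ≠ -1 := by
    rw [Ne, PySem.Chars.findFrom_natCast_eq_neg_one_iff s sub k hk, not_not]
    apply (PySem.Chars.isIn_iff_infix _ _).mp
    apply (PySem.Chars.exists_prefix_drop_iff_isIn _ _).mp
    refine ⟨q - k, ?_⟩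
    rw [List.drop_drop]
    have he : k + (q - k) = q := by omega
    rw [he]
    exact h1
  obtain ⟨hge, hpre, hmin⟩ := PySem.Chars.findFrom_natCast_spec s sub k hk hne
  have h0 : 0 ≤ PySem.Chars.findFrom s sub (k : Int) := le_trans (by omega) hge
  have heq : (PySem.Chars.findFrom s sub (k : Int)).toNat = q := by
    rcases Nat.lt_trichotomy (PySem.Chars.findFrom s sub (k : Int)).toNat q with hlt | he | hgt
    · refine absurd hpre (h2 _ ?_ hlt)
      have : (k : Int) ≤ ((PySem.Chars.findFrom s sub (k : Int)).toNat : Int) := by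
        rw [Int.toNat_of_nonneg h0]; exact hge
      exact_mod_cast this
    · exact he
    · exact absurd h1 (hmin q hkq hgt)
  rw [← Int.toNat_of_nonneg h0, heq]

def pvInc : List Char := "#include <Math/MathConstants.mqh>".toList

def pvBcore (cs : List Char) : List Char :=
  let pos := PySem.Chars.find cs pvNeedle
  if pos = -1 then pvInc ++ '\n' :: cs
  else
    let nl := PySem.Chars.findFrom cs pvNL pos
    if nl = -1 then cs ++ '\n' :: pvInc
    else
      PySem.Chars.slice cs none (some (nl + 1)) ++ pvInc ++ '\n' ::
        PySem.Chars.slice cs (some (nl + 1)) none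

theorem pv_join_cons (p : List Char) {Z : List (List Char)} (h : Z ≠ []) :
    PySem.Chars.join pvNL (p :: Z) = p ++ pvNL ++ PySem.Chars.join pvNL Z := by
  cases Z with
  | nil => exact absurd rfl h
  | cons z zs => exact PySem.Chars.join_cons_cons _ _ _ _

theorem pv_drop_mid (l rest : List Char) (j : Nat) :
    (l ++ '\n' :: rest).drop (l.length + 1 + j) = rest.drop j := by
  rw [List.drop_append, List.drop_eq_nil_of_le (by omega), List.nil_append]
  have he : l.length + 1 + j - l.length = j + 1 := by omega
  rw [he, List.drop_succ_cons]

theorem pv_take_mid (l rest : List Char) (j : Nat) :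
    (l ++ '\n' :: rest).take (l.length + 1 + j) = l ++ '\n' :: rest.take j := by
  rw [List.take_append, List.take_of_length_le (by omega)]
  have he : l.length + 1 + j - l.length = j + 1 := by omega
  rw [he, List.take_succ_cons]

theorem pv_drop_at (l rest : List Char) : (l ++ '\n' :: rest).drop l.length = '\n' :: rest := by
  rw [List.drop_append, List.drop_eq_nil_of_le le_rfl, List.nil_append, Nat.sub_self,
    List.drop_zero]

theorem pv_prefix_lift {l X u : List Char} {i : Nat} (h : u <+: l.drop i) :
    u <+: (l ++ X).drop i := by
  rw [List.drop_append]
  exact h.trans (List.prefix_append _ _)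

theorem pv_no_nl_prefix {l rest : List Char} (hnl : '\n' ∉ l) {i : Nat} (hi : i < l.length) :
    ¬ (pvNL <+: (l ++ '\n' :: rest).drop i) := by
  intro h
  rw [List.drop_append, Nat.sub_eq_zero_of_le (by omega), List.drop_zero] at h
  cases hld : l.drop i with
  | nil => have := List.length_drop (i := i) (l := l); rw [hld] at this; simp at this; omega
  | cons c u =>
    rw [hld] at h
    obtain ⟨t, ht⟩ := h
    have hc : c = '\n' := by
      have := congrArg (List.head? ·) ht
      simpa [pvNL] using this.symm
    apply hnl
    have : c ∈ l.drop i := by rw [hld]; exact List.mem_cons_self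
    exact hc ▸ List.mem_of_mem_drop this

theorem pv_hN : "#property strict".toList = pvNeedle := rfl

theorem pv_main_aux : ∀ (n : Nat) (cs : List Char), cs.length ≤ n →
    pvBcore cs = PySem.Chars.join pvNL
      (PySem.List.insert (pvSplit cs) ((pvScanA (pvSplit cs) 0 : Nat) : Int) pvInc) := by
  intro n
  induction n with
  | zero =>
    intro cs hn
    have hcs : cs = [] := List.eq_nil_of_length_eq_zero (by omega)
    subst hcs
    decide
  | succ n ih =>
    intro cs hn
    by_cases hmem : '\n' ∈ cs
    · -- cs = l ++ '\n' :: rest with '\n' ∉ l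
      obtain ⟨l, rest, hdec, hnl⟩ := pv_decomp hmem
      subst hdec
      rw [pvSplit_break rest hnl]
      have hlen : (l ++ '\n' :: rest).length = l.length + 1 + rest.length := by simp; omega
      by_cases hitl : PySem.Chars.isIn pvNeedle l = true
      · -- needle occurs in the first line l
        obtain ⟨j, hj⟩ := (PySem.Chars.exists_prefix_drop_iff_isIn _ _).mpr hitl
        have hjlen : pvNeedle.length ≤ l.length - j := by
          have h1 := hj.length_le
          have h2 : (l.drop j).length = l.length - j := List.length_drop
          omega
        have hneedlen : 0 < pvNeedle.length := by decide
        have h0 : 0 ≤ PySem.Chars.find (l ++ '\n' :: rest) pvNeedle := by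
          apply (PySem.Chars.find_nonneg_iff _ _).mpr
          apply (PySem.Chars.isIn_iff_infix _ _).mp
          apply (PySem.Chars.exists_prefix_drop_iff_isIn _ _).mp
          exact ⟨j, pv_prefix_lift hj⟩
        set f := PySem.Chars.find (l ++ '\n' :: rest) pvNeedle with hf
        obtain ⟨hpre, hmin⟩ := PySem.Chars.find_spec (s := l ++ '\n' :: rest) (sub := pvNeedle) h0
        have hple : f.toNat ≤ j := by
          by_contra hgt
          exact hmin j (by omega) (pv_prefix_lift hj)
        have hplen : f.toNat + pvNeedle.length ≤ l.length := by
          rcases pv_cross (rest := rest) hpre with ⟨h1, _⟩ | ⟨h1, _⟩ <;> omega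
        have hne : f ≠ -1 := by omega
        have hnlval : PySem.Chars.findFrom (l ++ '\n' :: rest) pvNL f = (l.length : Int) := by
          rw [← Int.toNat_of_nonneg h0]
          apply pv_findFrom_intro
          · omega
          · omega
          · rw [pv_drop_at]
            exact ⟨rest, rfl⟩
          · intro i _ hi2
            exact pv_no_nl_prefix hnl hi2
        -- A side
        have hscan : pvScanA (l :: pvSplit rest) 0 = 1 := by
          simp only [pvScanA, pv_hN]
          rw [if_pos hitl]
        rw [hscan]
        rw [PySem.List.insert_natCast _ 1 _ (by simp)]
        have hins : List.take 1 (l :: pvSplit rest) ++ pvInc :: List.drop 1 (l :: pvSplit rest)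
            = l :: pvInc :: pvSplit rest := by simp
        rw [hins, PySem.Chars.join_cons_cons,
          pv_join_cons pvInc (pvSplit_ne_nil rest), pv_join]
        -- B side
        simp only [pvBcore]
        rw [← hf, if_neg hne, hnlval]
        rw [if_neg (by omega : (l.length : Int) ≠ -1)]
        have hcast : (l.length : Int) + 1 = ((l.length + 1 : Nat) : Int) := by push_cast; ring
        rw [hcast]
        simp only [PySem.Chars.slice_eq_listSlice]
        rw [PySem.List.slice_to _ (by omega), PySem.List.slice_from _ (by omega)]
        rw [Int.toNat_natCast]
        have htake : List.take (l.length + 1) (l ++ '\n' :: rest) = l ++ ['\n'] := by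
          have := pv_take_mid l rest 0
          simpa using this
        have hdrop : List.drop (l.length + 1) (l ++ '\n' :: rest) = rest := by
          have := pv_drop_mid l rest 0
          simpa using this
        rw [htake, hdrop]
        simp [pvNL]
      · by_cases hitr : PySem.Chars.isIn pvNeedle rest = true
        · -- needle first occurs in rest
          have hitlf : PySem.Chars.isIn pvNeedle l = false := by
            simpa using hitl
          have h0r : 0 ≤ PySem.Chars.find rest pvNeedle :=
            (PySem.Chars.find_nonneg_iff _ _).mpr ((PySem.Chars.isIn_iff_infix _ _).mp hitr)
          set pr := (PySem.Chars.find rest pvNeedle).toNat with hprdef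
          obtain ⟨hprer, hminr⟩ := PySem.Chars.find_spec (s := rest) (sub := pvNeedle) h0r
          have hprle : pr ≤ rest.length := by
            have := PySem.Chars.find_le_length rest pvNeedle
            omega
          -- find on cs
          have hfind : PySem.Chars.find (l ++ '\n' :: rest) pvNeedle
              = ((l.length + 1 + pr : Nat) : Int) := by
            apply pv_find_intro
            · rw [pv_drop_mid]
              exact hprer
            · intro i hi hpfx
              rcases pv_cross (rest := rest) hpfx with ⟨h1, h2⟩ | ⟨h1, h2⟩
              · have : PySem.Chars.isIn pvNeedle l = true :=
                  (PySem.Chars.exists_prefix_drop_iff_isIn _ _).mp ⟨i, h2⟩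
                rw [this] at hitlf; cases hitlf
              · exact hminr (i - (l.length + 1)) (by omega) h2
          have hne : PySem.Chars.find (l ++ '\n' :: rest) pvNeedle ≠ -1 := by
            rw [hfind]; omega
          -- IH for rest
          have hih := ih rest (by omega)
          -- A side value
          set m := pvScanA (pvSplit rest) 0 with hm
          have hmle : m ≤ (pvSplit rest).length := pvScanA_le _
          have hanyr : (pvSplit rest).any (fun l => PySem.Chars.isIn pvNeedle l) = true := by
            rw [pv_any]; exact hitr
          have hscan : pvScanA (l :: pvSplit rest) 0 = 1 + m := by
            simp only [pvScanA, pv_hN]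
            rw [if_neg (by rw [hitlf]; simp), pvScanA_shift]
            simp only [pv_hN]
            rw [if_pos hanyr, ← hm]
          rw [hscan]
          rw [PySem.List.insert_natCast _ (1 + m) _ (by simp; omega)]
          have hins : List.take (1 + m) (l :: pvSplit rest) ++ pvInc ::
              List.drop (1 + m) (l :: pvSplit rest)
              = l :: (List.take m (pvSplit rest) ++ pvInc :: List.drop m (pvSplit rest)) := by
            rw [Nat.add_comm 1 m, List.take_succ_cons, List.drop_succ_cons]
            simp
          rw [hins]
          have hZne : List.take m (pvSplit rest) ++ pvInc :: List.drop m (pvSplit rest) ≠ [] := by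
            simp
          rw [pv_join_cons l hZne]
          have hjoinZ : PySem.Chars.join pvNL
              (List.take m (pvSplit rest) ++ pvInc :: List.drop m (pvSplit rest))
              = pvBcore rest := by
            rw [hih, PySem.List.insert_natCast _ m _ hmle]
          rw [hjoinZ]
          -- B side: show pvBcore (l ++ '\n'::rest) = l ++ pvNL ++ pvBcore rest
          have hprcast : ((PySem.Chars.find rest pvNeedle)) = ((pr : Nat) : Int) := by
            rw [hprdef, Int.toNat_of_nonneg h0r]
          have hrne : PySem.Chars.find rest pvNeedle ≠ -1 := by omega
          by_cases hnlr : PySem.Chars.findFrom rest pvNL ((pr : Nat) : Int) = -1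
          · -- no newline in rest at or after pr
            have hnlcs : PySem.Chars.findFrom (l ++ '\n' :: rest) pvNL
                ((l.length + 1 + pr : Nat) : Int) = -1 := by
              rw [PySem.Chars.findFrom_natCast_eq_neg_one_iff _ _ _ (by omega)]
              rw [pv_drop_mid]
              rw [PySem.Chars.findFrom_natCast_eq_neg_one_iff _ _ _ (by omega)] at hnlr
              exact hnlr
            simp only [pvBcore]
            rw [if_neg hne, hfind, hnlcs, if_pos rfl]
            rw [if_neg hrne, hprcast, hnlr, if_pos rfl]
            simp [pvNL]
          · -- newline in rest at qr
            obtain ⟨hger, hprer2, hminr2⟩ :=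
              PySem.Chars.findFrom_natCast_spec rest pvNL pr (by omega) hnlr
            have h0q : 0 ≤ PySem.Chars.findFrom rest pvNL ((pr : Nat) : Int) := by
              calc (0 : Int) ≤ (pr : Int) := by omega
                _ ≤ _ := hger
            set qr := (PySem.Chars.findFrom rest pvNL ((pr : Nat) : Int)).toNat with hqrdef
            have hqrval : PySem.Chars.findFrom rest pvNL ((pr : Nat) : Int) = ((qr : Nat) : Int) := by
              rw [hqrdef, Int.toNat_of_nonneg h0q]
            have hprqr : pr ≤ qr := by omega
            have hqrle : qr ≤ rest.length := by
              have h1 : pvNL <+: rest.drop qr := hprer2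
              have h2 := h1.length_le
              have h3 : (rest.drop qr).length = rest.length - qr := List.length_drop
              have h4 : 0 < pvNL.length := by decide
              omega
            have hnlcs : PySem.Chars.findFrom (l ++ '\n' :: rest) pvNL
                ((l.length + 1 + pr : Nat) : Int) = ((l.length + 1 + qr : Nat) : Int) := by
              apply pv_findFrom_intro (by omega) (by omega)
              · rw [pv_drop_mid]
                exact hprer2
              · intro i hi1 hi2
                have hdec2 : i = l.length + 1 + (i - (l.length + 1)) := by omega
                rw [hdec2, pv_drop_mid]
                exact hminr2 (i - (l.length + 1)) (by omega) (by omega)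
            simp only [pvBcore]
            rw [if_neg hne, hfind, hnlcs]
            rw [if_neg (by omega : ((l.length + 1 + qr : Nat) : Int) ≠ -1)]
            rw [if_neg hrne, hprcast, hqrval]
            rw [if_neg (by omega : ((qr : Nat) : Int) ≠ -1)]
            have hc1 : ((l.length + 1 + qr : Nat) : Int) + 1 = ((l.length + 1 + (qr + 1) : Nat) : Int) := by
              push_cast; ring
            have hc2 : ((qr : Nat) : Int) + 1 = ((qr + 1 : Nat) : Int) := by push_cast; ring
            rw [hc1, hc2]
            simp only [PySem.Chars.slice_eq_listSlice]
            rw [PySem.List.slice_to _ (by omega), PySem.List.slice_from _ (by omega),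
              PySem.List.slice_to _ (by omega), PySem.List.slice_from _ (by omega)]
            rw [Int.toNat_natCast, Int.toNat_natCast]
            rw [pv_take_mid, pv_drop_mid]
            simp [pvNL]
        · -- needle in neither part
          have hitlf : PySem.Chars.isIn pvNeedle l = false := by simpa using hitl
          have hitrf : PySem.Chars.isIn pvNeedle rest = false := by simpa using hitr
          have hcsf : PySem.Chars.isIn pvNeedle (l ++ '\n' :: rest) = false := by
            rw [pv_isIn_append, hitlf, hitrf]; rfl
          have hpos : PySem.Chars.find (l ++ '\n' :: rest) pvNeedle = -1 := by
            rw [PySem.Chars.find_eq_neg_one_iff]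
            intro hin
            rw [(PySem.Chars.isIn_iff_infix _ _).mpr hin] at hcsf; cases hcsf
          have hanyr : (pvSplit rest).any (fun l => PySem.Chars.isIn pvNeedle l) = false := by
            rw [pv_any]; exact hitrf
          have hscan : pvScanA (l :: pvSplit rest) 0 = 0 := by
            simp only [pvScanA, pv_hN]
            rw [if_neg (by rw [hitlf]; simp), pvScanA_shift]
            simp only [pv_hN]
            rw [if_neg (by rw [hanyr]; simp)]
          rw [hscan]
          rw [PySem.List.insert_natCast _ 0 _ (by simp), List.take_zero, List.drop_zero,
            List.nil_append]
          rw [pv_join_cons pvInc (by simp), ← pvSplit_break rest hnl, pv_join]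
          simp only [pvBcore]
          rw [if_pos hpos]
          simp [pvNL]
    · -- no newline anywhere in cs
      rw [pvSplit_no_nl hmem]
      by_cases hit : PySem.Chars.isIn pvNeedle cs = true
      · have h0 : 0 ≤ PySem.Chars.find cs pvNeedle :=
          (PySem.Chars.find_nonneg_iff _ _).mpr ((PySem.Chars.isIn_iff_infix _ _).mp hit)
        have hne : PySem.Chars.find cs pvNeedle ≠ -1 := by omega
        have hkle : (PySem.Chars.find cs pvNeedle).toNat ≤ cs.length := by
          have := PySem.Chars.find_le_length cs pvNeedle
          omega
        have hnlv : PySem.Chars.findFrom cs pvNL (PySem.Chars.find cs pvNeedle) = -1 := by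
          rw [← Int.toNat_of_nonneg h0,
            PySem.Chars.findFrom_natCast_eq_neg_one_iff cs pvNL _ hkle]
          intro hin
          exact hmem (List.mem_of_mem_drop (hin.subset (by simp [pvNL])))
        have hscan : pvScanA [cs] 0 = 1 := by
          simp only [pvScanA, pv_hN]
          rw [if_pos hit]
        rw [hscan]
        rw [PySem.List.insert_natCast _ 1 _ (by simp)]
        have hins : List.take 1 [cs] ++ pvInc :: List.drop 1 [cs] = [cs, pvInc] := by simp
        rw [hins, PySem.Chars.join_cons_cons, PySem.Chars.join_singleton]
        simp only [pvBcore]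
        rw [if_neg hne, hnlv, if_pos rfl]
        simp [pvNL]
      · have hfalse : PySem.Chars.isIn pvNeedle cs = false := by simpa using hit
        have hpos : PySem.Chars.find cs pvNeedle = -1 := by
          rw [PySem.Chars.find_eq_neg_one_iff]
          intro hin
          rw [(PySem.Chars.isIn_iff_infix _ _).mpr hin] at hfalse; cases hfalse
        have hscan : pvScanA [cs] 0 = 0 := by
          simp only [pvScanA, pv_hN]
          rw [if_neg (by rw [hfalse]; simp)]
        rw [hscan]
        rw [PySem.List.insert_natCast _ 0 _ (by simp), List.take_zero, List.drop_zero,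
          List.nil_append]
        rw [PySem.Chars.join_cons_cons, PySem.Chars.join_singleton]
        simp only [pvBcore]
        rw [if_pos hpos]
        simp [pvNL]

theorem pv_main (cs : List Char) :
    pvBcore cs = PySem.Chars.join pvNL
      (PySem.List.insert (pvSplit cs) ((pvScanA (pvSplit cs) 0 : Nat) : Int) pvInc) :=
  pv_main_aux cs.length cs le_rfl

theorem pvBcore_ofList (cs : List Char) :
    (if PySem.Chars.find cs pvNeedle = -1 then String.ofList (pvInc ++ '\n' :: cs)
     else
       if PySem.Chars.findFrom cs pvNL (PySem.Chars.find cs pvNeedle) = -1 then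
         String.ofList (cs ++ '\n' :: pvInc)
       else
         String.ofList (PySem.Chars.slice cs none
             (some (PySem.Chars.findFrom cs pvNL (PySem.Chars.find cs pvNeedle) + 1)) ++ pvInc ++
           '\n' :: PySem.Chars.slice cs
             (some (PySem.Chars.findFrom cs pvNL (PySem.Chars.find cs pvNeedle) + 1))))
    = String.ofList (pvBcore cs) := by
  simp only [pvBcore]
  split_ifs <;> rfl

-- ===== VERDICT (by name: the statement is the Claim_ definition above) =====
theorem add_missing_includes_spec : Claim_equal_add_missing_includes := by
  unfold Claim_equal_add_missing_includes
  intro content filename _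
  unfold Spec_add_missing_includes add_missing_includes add_missing_includes_alt
  dsimp only
  rw [show "\n".toList = pvNL from rfl,
    show "#property strict".toList = pvNeedle from rfl,
    show "#include <Math/MathConstants.mqh>".toList = pvInc from rfl]
  by_cases hd : PySem.Chars.isIn "DBL_EPSILON".toList content.toList = true
  · by_cases hm : PySem.Chars.isIn "#include <Math".toList content.toList = true
    · rw [hd, hm]
      simp only [Bool.not_true, Bool.and_false, Bool.false_or]
      rw [if_neg (by simp : ¬ ((false : Bool) = true)),
        if_pos (by decide : List.isEmpty ([] : List (List Char)) = true)]
      simp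
    · rw [Bool.not_eq_true] at hm
      rw [hd, hm]
      simp only [Bool.not_false, Bool.and_self, Bool.not_true, Bool.or_self]
      rw [if_pos (trivial : True),
        if_neg (by simp : ¬ ((false : Bool) = true)),
        if_neg (by simp : ¬ (List.isEmpty (([] : List (List Char)) ++ [pvInc]) = true))]
      rw [pv_splitOn]
      rw [List.nil_append, List.foldl_cons, List.foldl_nil]
      dsimp only
      rw [pvBcore_ofList content.toList]
      exact congrArg String.ofList (pv_main content.toList).symm
  · rw [Bool.not_eq_true] at hd
    rw [hd]
    simp only [Bool.not_false, Bool.false_and, Bool.true_or]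
    rw [if_neg (by simp : ¬ ((false : Bool) = true)),
      if_pos (by decide : List.isEmpty ([] : List (List Char)) = true)]
    simp
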